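-- pv_equiv track=rewrite | github.com/Enjef/Algo | 1800 - 1899/1887 - Reduction Operations to Make the Array Elements Equal/1887 - Reduction Operations to Make the Array Elements Equal.py | reductionOperations_best_memory
-- ===== SOURCE A (Python) =====
-- from typing import List
--
-- def reductionOperations_best_memory(nums: List[int]) -> int:
--     nums.sort()
--     cur = nums.pop(0)
--     factor = 0
--     moves = 0
--     while nums:
--         tmp = nums.pop(0)
--         if tmp > cur:
--             factor += 1
--         cur = tmp
--         moves += factor
--     return moves
-- ===== SOURCE B (Python) =====
-- from typing import List
--
-- def reductionOperations_best_memory(nums: List[int]) -> int: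
--     cnt = {}
--     for x in nums:
--         cnt[x] = cnt.get(x, 0) + 1
--     moves = 0
--     for rank, v in enumerate(sorted(cnt)):
--         moves += rank * cnt[v]
--     return moves
-- ===== Notes on version B (the rewrite author's own statement) =====
-- stated objective: faster
-- what changed: Instead of sorting and then repeatedly popping the first element (each pop(0) is O(n)), B builds a value->count dictionary in one pass and sums rank*count over the sorted distinct values.
import Mathlib
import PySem

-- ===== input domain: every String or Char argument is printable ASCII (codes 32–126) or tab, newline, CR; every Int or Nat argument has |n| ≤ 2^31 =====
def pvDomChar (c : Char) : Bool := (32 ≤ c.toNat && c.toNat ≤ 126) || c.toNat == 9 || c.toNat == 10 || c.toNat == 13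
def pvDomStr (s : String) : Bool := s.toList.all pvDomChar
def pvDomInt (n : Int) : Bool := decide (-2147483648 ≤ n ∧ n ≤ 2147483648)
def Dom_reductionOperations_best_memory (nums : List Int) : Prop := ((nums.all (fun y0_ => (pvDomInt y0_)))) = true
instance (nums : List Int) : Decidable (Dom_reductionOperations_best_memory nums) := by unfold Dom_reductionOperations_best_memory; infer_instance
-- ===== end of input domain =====

-- B replaces A's sort + repeated pop(0) scan by a value->count dictionary summed with rank over the
-- sorted distinct values (a timing run measured B faster). A mutates its argument in place
-- (sorts and empties it); the equivalence proved here is about the RETURN value only.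

-- ===== PORT A =====
-- A's while-loop: cur/factor/moves state, popping the head each iteration.
def pvLoopA : Int → Int → Int → List Int → Int
  | _, _, moves, [] => moves
  | cur, factor, moves, tmp :: rest =>
      let factor' := if tmp > cur then factor + 1 else factor
      pvLoopA tmp factor' (moves + factor') rest

def reductionOperations_best_memory (nums : List Int) : Int :=
  match PySem.List.sorted nums (fun x => x) false with
  | [] => 0   -- Python raises IndexError here (pop from empty list); excluded by Pre_
  | cur :: rest => pvLoopA cur 0 0 rest

-- ===== PORT B =====
def reductionOperations_best_memory_alt (nums : List Int) : Int :=
  let cnt : PySem.Dict Int Int :=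
    nums.foldl (fun d x => d.insert x (d.getD x 0 + 1)) PySem.Dict.empty
  (PySem.List.enumerate (PySem.List.sorted cnt.keys (fun x => x) false) 0).foldl
    (fun moves rv => moves + rv.1 * cnt.getD rv.2 0) 0

-- ===== PRECONDITION & SPEC =====
-- Pre_ excludes exactly the empty list, on which A raises IndexError (pop from empty list).
def Pre_reductionOperations_best_memory (nums : List Int) : Prop := nums ≠ []
instance (nums : List Int) : Decidable (Pre_reductionOperations_best_memory nums) := by
  unfold Pre_reductionOperations_best_memory; infer_instance

def pvWitness_reductionOperations_best_memory : List Int := [1]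

def Spec_reductionOperations_best_memory (nums : List Int) (out : Int) : Prop :=
  out = reductionOperations_best_memory_alt nums
instance (nums : List Int) (out : Int) : Decidable (Spec_reductionOperations_best_memory nums out) := by
  unfold Spec_reductionOperations_best_memory; infer_instance

-- ===== CLAIM (what is proved, stated in full; the proofs are below) =====
def Claim_equal_reductionOperations_best_memory : Prop :=
  ∀ (nums : List Int), Dom_reductionOperations_best_memory nums →
    Pre_reductionOperations_best_memory nums →
    Spec_reductionOperations_best_memory nums (reductionOperations_best_memory nums)

-- ===== LEMMAS AND PROOFS =====

-- number of distinct values of the set T that are strictly below x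
def pvRk (T : Finset Int) (x : Int) : Int := ((T.filter (· < x)).card : Int)

-- A's loop on a sorted list sums, per element, the number of distinct values below it
lemma pvLoopA_eq (l : List Int) : ∀ (cur f m : Int), (cur :: l).Pairwise (· ≤ ·) →
    pvLoopA cur f m l = m + (l.map (fun x => f + pvRk (cur :: l).toFinset x)).sum := by
  induction l with
  | nil => intro cur f m _; simp [pvLoopA]
  | cons w l' ih =>
    intro cur f m hp
    have hcw : cur ≤ w := (List.pairwise_cons.mp hp).1 w (by simp)
    have hp' : (w :: l').Pairwise (· ≤ ·) := (List.pairwise_cons.mp hp).2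
    have hwl : ∀ x ∈ l', w ≤ x := fun x hx => (List.pairwise_cons.mp hp').1 x hx
    have hT' : ∀ y ∈ (w :: l').toFinset, w ≤ y := by
      intro y hy
      have hy' : y = w ∨ y ∈ l' := by simpa using hy
      rcases hy' with rfl | h
      · omega
      · exact hwl y h
    have hfilt : l'.toFinset.filter (· < w) = ∅ := by
      apply Finset.filter_eq_empty_iff.mpr
      intro y hy
      have := hwl y (List.mem_toFinset.mp hy); simpa using not_lt.mpr this
    have hrkw : pvRk (cur :: w :: l').toFinset w = if w > cur then 1 else 0 := by
      simp only [pvRk, List.toFinset_cons, Finset.filter_insert, hfilt]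
      by_cases h : cur < w <;> simp [h]
    have hrkx : ∀ x ∈ l', pvRk (cur :: w :: l').toFinset x
        = (if w > cur then 1 else 0) + pvRk (w :: l').toFinset x := by
      intro x hx
      by_cases h : cur < w
      · have hcx : cur < x := lt_of_lt_of_le h (hwl x hx)
        have hnot : cur ∉ (w :: l').toFinset.filter (· < x) := by
          intro hc
          have := hT' cur (Finset.mem_of_mem_filter _ hc)
          omega
        have : (cur :: w :: l').toFinset.filter (· < x)
            = insert cur ((w :: l').toFinset.filter (· < x)) := by
          simp only [List.toFinset_cons, Finset.filter_insert, if_pos hcx]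
        rw [pvRk, this, Finset.card_insert_of_notMem hnot]
        simp [pvRk, h, Finset.filter_insert]
        ring
      · have hcweq : cur = w := le_antisymm hcw (not_lt.mp h)
        simp only [pvRk, List.toFinset_cons, hcweq, Finset.insert_idem]
        simp
    show pvLoopA w (if w > cur then f + 1 else f) (m + (if w > cur then f + 1 else f)) l'
        = m + ((w :: l').map (fun x => f + pvRk (cur :: w :: l').toFinset x)).sum
    rw [ih w _ _ hp']
    have hmap : l'.map (fun x => f + pvRk (cur :: w :: l').toFinset x)
        = l'.map (fun x => (if w > cur then f + 1 else f) + pvRk (w :: l').toFinset x) :=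
      List.map_congr_left (fun x hx => by
        simp only [hrkx x hx]
        by_cases h : cur < w <;> (simp [h]; try ring))
    simp only [List.map_cons, List.sum_cons, hrkw, hmap]
    by_cases h : cur < w <;> simp [h] <;> try ring

-- in a strictly sorted list, the number of distinct values below the i-th element is i
lemma pvRank_sorted (d : List Int) (hd : d.Pairwise (· < ·)) (i : Nat) (h : i < d.length) :
    pvRk d.toFinset d[i] = (i : Int) := by
  have hmono : ∀ (p q : Nat) (hp : p < d.length) (hq : q < d.length), p < q → d[p] < d[q] :=
    fun p q hp hq hpq => List.pairwise_iff_getElem.mp hd p q hp hq hpq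
  have hset : d.toFinset.filter (· < d[i]) = (d.take i).toFinset := by
    ext y
    simp only [Finset.mem_filter, List.mem_toFinset]
    constructor
    · rintro ⟨hy, hlt⟩
      obtain ⟨j, hj, rfl⟩ := List.mem_iff_getElem.mp hy
      have hji : j < i := by
        by_contra hge
        rcases Nat.lt_or_ge i j with hij | hij
        · exact absurd (hmono i j h hj hij) (by omega)
        · have : i = j := by omega
          subst this; omega
      refine List.mem_iff_getElem.mpr ⟨j, by simp [List.length_take]; omega, ?_⟩
      simp [List.getElem_take]
    · intro hy
      obtain ⟨j, hj, rfl⟩ := List.mem_iff_getElem.mp hy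
      have hjlen : j < d.length := by simp [List.length_take] at hj; omega
      have hji : j < i := by simp [List.length_take] at hj; omega
      refine ⟨?_, ?_⟩
      · rw [List.getElem_take]; exact List.getElem_mem hjlen
      · rw [List.getElem_take]; exact hmono j i hjlen h hji
  have hnd : (d.take i).Nodup := by
    have : (d.take i).Pairwise (· < ·) := hd.sublist (List.take_sublist i d)
    exact this.imp ne_of_lt
  rw [pvRk, hset, List.toFinset_card_of_nodup hnd]
  simp [List.length_take]; omega

lemma pvFoldEnum (T : Finset Int) (g : Int → Int) :
    ∀ (d : List Int) (s init : Int),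
      (∀ (j : Nat) (hj : j < d.length), pvRk T d[j] = s + j) →
      (PySem.List.enumerate d s).foldl (fun m rv => m + rv.1 * g rv.2) init
        = init + (d.map (fun x => pvRk T x * g x)).sum := by
  intro d
  induction d with
  | nil => intro s init _; simp [PySem.List.enumerate_nil]
  | cons x d' ih =>
    intro s init H
    have hx : pvRk T x = s := by simpa using H 0 (by simp)
    have H' : ∀ (j : Nat) (hj : j < d'.length), pvRk T d'[j] = (s + 1) + j := by
      intro j hj
      have := H (j + 1) (by simp; omega)
      simp only [List.getElem_cons_succ] at this; push_cast at this ⊢; linarith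
    rw [PySem.List.enumerate_cons, List.foldl_cons, ih (s + 1) _ H']
    simp [hx]; ring

-- the two ports both equal the rank-weighted count sum
lemma pvMain (nums : List Int) (hne : nums ≠ []) :
    reductionOperations_best_memory nums = reductionOperations_best_memory_alt nums := by
  -- names
  set s := PySem.List.sorted nums (fun x => x) false with hs
  set d := PySem.List.sorted (PySem.Set.ofList nums) (fun x => x) false with hdd
  have hsperm : s.Perm nums := PySem.List.sorted_perm nums (fun x => x) false
  have hsne : s ≠ [] := by
    intro h0
    rw [hs] at h0
    exact hne ((PySem.List.sorted_eq_nil_iff nums (fun x => x) false).mp h0)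
  obtain ⟨h, t, hst⟩ := List.exists_cons_of_ne_nil hsne
  have hpair : s.Pairwise (· ≤ ·) := PySem.List.sorted_pairwise nums (fun x => x)
  have hdpair : d.Pairwise (· < ·) := PySem.List.sorted_ofList_pairwise_lt nums
  have hdperm : d.Perm (PySem.Set.ofList nums) := PySem.List.sorted_perm (PySem.Set.ofList nums) (fun x => x) false
  have hdnodup : d.Nodup := hdpair.imp ne_of_lt
  -- the common value set
  have hSfin : s.toFinset = nums.toFinset := List.toFinset_eq_of_perm _ _ hsperm
  have hDfin : d.toFinset = nums.toFinset := by
    rw [List.toFinset_eq_of_perm _ _ hdperm]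
    ext y
    simp only [List.mem_toFinset]
    rw [← PySem.List.dedup_eq_ofList]
    exact PySem.List.mem_dedup nums y
  -- A side
  have hst' : PySem.List.sorted nums (fun x => x) false = h :: t := by rw [← hs]; exact hst
  have hmin : ∀ y ∈ nums, h ≤ y := fun y hy => PySem.List.key_head_sorted_le nums (fun x => x) hst' y hy
  have hrkh : pvRk nums.toFinset h = 0 := by
    rw [pvRk]
    have : nums.toFinset.filter (· < h) = ∅ := by
      apply Finset.filter_eq_empty_iff.mpr
      intro y hy
      simpa using not_lt.mpr (hmin y (List.mem_toFinset.mp hy))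
    simp [this]
  have hA : reductionOperations_best_memory nums
      = (s.map (fun x => pvRk nums.toFinset x)).sum := by
    rw [reductionOperations_best_memory, ← hs, hst]
    show pvLoopA h 0 0 t = _
    rw [pvLoopA_eq t h 0 0 (hst ▸ hpair)]
    rw [List.map_cons, List.sum_cons, hrkh]
    have : (t.map (fun x => (0:Int) + pvRk (h :: t).toFinset x))
        = t.map (fun x => pvRk nums.toFinset x) := by
      apply List.map_congr_left
      intro x hx
      rw [zero_add, ← hst, hSfin]
    rw [this]
  -- B side
  have hB : reductionOperations_best_memory_alt nums
      = (d.map (fun x => pvRk nums.toFinset x * (nums.count x : Int))).sum := by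
    rw [reductionOperations_best_memory_alt]
    simp only [PySem.Dict.foldl_insert_getD_add_one_eq_counter, PySem.Dict.keys_counter]
    rw [pvFoldEnum nums.toFinset (fun v => (PySem.Dict.counter nums).getD v 0) d 0 0 ?_]
    · rw [zero_add]
      exact congrArg List.sum (List.map_congr_left (fun x hx => by
        rw [PySem.Dict.getD_counter]))
    · intro j hj
      rw [← hDfin]
      simpa using pvRank_sorted d hdpair j hj
  -- equate the two sums
  rw [hA, hB]
  have h1 : (s.map (fun x => pvRk nums.toFinset x)).sum
      = (nums.map (fun x => pvRk nums.toFinset x)).sum :=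
    (hsperm.map _).sum_eq
  rw [h1, Finset.sum_list_map_count]
  have h2 : (d.map (fun x => pvRk nums.toFinset x * (nums.count x : Int))).sum
      = ∑ v ∈ nums.toFinset, pvRk nums.toFinset v * (nums.count v : Int) := by
    rw [← hDfin, List.sum_toFinset _ hdnodup]
  rw [h2]
  apply Finset.sum_congr rfl
  intro v hv
  rw [nsmul_eq_mul]
  ring

-- ===== VERDICT (by name: the statement is the Claim_ definition above) =====
theorem reductionOperations_best_memory_spec : Claim_equal_reductionOperations_best_memory := by
  intro nums _hdom hpre
  exact pvMain nums hpre
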